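-- pv_equiv track=rewrite | github.com/dohy12/coding_test | heap/heap1b.py | solution
-- ===== SOURCE A (Python) =====
-- import heapq
--
-- def solution(scoville, K):
--     answer = 0
--
--     heapq.heapify(scoville)
--
--     while True:
--         min1 = heapq.heappop(scoville)
--         if min1 >= K:
--             break
--         elif len(scoville)==0:
--             answer = -1
--             break
--
--         min2 = heapq.heappop(scoville)
--         new_scoville = min1 + min2*2
--         heapq.heappush(scoville, new_scoville)
--         answer+=1
--
--     return answer
-- ===== SOURCE B (Python) =====
-- def _take(base, made, i, j):
--     # pop the smaller front of the two sorted runs base[i:], made[j:]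
--     if j < len(made) and (i >= len(base) or made[j] <= base[i]):
--         return made[j], i, j + 1
--     return base[i], i + 1, j      # IndexError when both runs are exhausted
--
--
-- def solution(scoville, K):
--     base = sorted(scoville)
--     made = []                     # mixed values, kept sorted from index j on
--     i = j = 0
--     answer = 0
--     while True:
--         m1, i, j = _take(base, made, i, j)
--         if m1 >= K:
--             return answer
--         if i == len(base) and j == len(made):
--             return -1
--         m2, i, j = _take(base, made, i, j)
--         v = m1 + 2 * m2
--         lo, hi = j, len(made)     # binary search for v's slot in made[j:]
--         while lo < hi:
--             mid = (lo + hi) // 2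
--             if made[mid] < v:
--                 lo = mid + 1
--             else:
--                 hi = mid
--         made.insert(lo, v)
--         answer += 1
-- ===== Notes on version B (the rewrite author's own statement) =====
-- stated objective: faster
-- what changed: A maintains a binary min-heap via heapq; B sorts the input once and consumes two sorted runs (the sorted input and the run of mixed values, kept sorted by binary-search insertion) with read pointers, merging their fronts.
import Mathlib
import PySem

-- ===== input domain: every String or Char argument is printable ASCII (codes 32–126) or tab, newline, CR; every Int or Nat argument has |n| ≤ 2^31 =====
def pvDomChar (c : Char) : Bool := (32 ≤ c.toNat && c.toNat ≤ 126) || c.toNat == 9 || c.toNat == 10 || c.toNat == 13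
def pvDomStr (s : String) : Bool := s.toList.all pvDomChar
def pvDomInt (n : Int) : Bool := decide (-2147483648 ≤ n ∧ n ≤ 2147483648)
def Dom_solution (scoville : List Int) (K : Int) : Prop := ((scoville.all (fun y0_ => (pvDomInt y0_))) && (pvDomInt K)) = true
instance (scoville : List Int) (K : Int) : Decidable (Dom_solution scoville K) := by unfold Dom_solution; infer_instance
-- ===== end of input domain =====

-- B replaces A's binary heap by one up-front sort and two sorted runs consumed
-- by read pointers (the sorted input and the run of mixed values, the latter kept
-- sorted by binary-search insertion); the equivalence is about the RETURN value
-- only — A heapifies its argument in place, B leaves it untouched.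

-- ===== PORT A =====
-- heapq keeps a binary min-heap of the Int values: heappop removes and returns
-- the smallest value, heappush adds a value.  The heap is modelled by the list
-- of its elements: heappop = first minimum + remove its first occurrence,
-- heappush = append.  Comparisons involve only the Int values, so the return
-- value of `solution` is exactly the Python's.
def solutionGo (heap : List Int) (K : Int) (answer : Int) : Int :=
  match hm : PySem.List.min? heap (fun x => x) with
  | none => answer            -- heappop from an empty heap raises: excluded by Pre_solution
  | some min1 =>
    let rest := (PySem.List.remove? heap min1).getD []
    if min1 ≥ K then answer
    else if rest.length = 0 then -1
    else
      match hm2 : PySem.List.min? rest (fun x => x) with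
      | none => answer        -- unreachable: rest is nonempty here
      | some min2 =>
        let rest2 := (PySem.List.remove? rest min2).getD []
        solutionGo (rest2 ++ [min1 + min2 * 2]) K (answer + 1)
termination_by heap.length
decreasing_by
  have h1 : min1 ∈ heap := PySem.List.min?_mem hm
  have e1 : PySem.List.remove? heap min1 = some (heap.erase min1) :=
    PySem.List.remove?_eq_some_erase heap min1 h1
  have h2 : min2 ∈ rest := PySem.List.min?_mem hm2
  have e2 : PySem.List.remove? rest min2 = some (rest.erase min2) :=
    PySem.List.remove?_eq_some_erase rest min2 h2
  have l1 : rest.length + 1 = heap.length := by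
    simp only [rest, e1, Option.getD_some]
    exact List.length_erase_add_one h1
  have l2 : rest2.length + 1 = rest.length := by
    simp only [rest2, e2, Option.getD_some]
    exact List.length_erase_add_one h2
  simp only [rest2, rest] at l1 l2 ⊢
  simp only [List.length_append, List.length_cons, List.length_nil]
  omega

def solution (scoville : List Int) (K : Int) : Int :=
  solutionGo scoville K 0

-- ===== PORT B =====
-- `while lo < hi: mid = (lo+hi)//2; if made[mid] < v: lo = mid+1 else: hi = mid`;
-- made[mid] is in range whenever lo ≤ mid < hi ≤ len(made), so it is read with getD.
def bisectGo (s : List Int) (v : Int) (lo hi : Nat) : Nat :=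
  if lo < hi then
    let mid := (lo + hi) / 2
    if s.getD mid 0 < v then bisectGo s v (mid + 1) hi
    else bisectGo s v lo mid
  else lo
termination_by hi - lo
decreasing_by all_goals omega

-- made.insert(lo, v) inserts v and shifts the tail: length grows by exactly one
theorem length_pyInsert (s : List Int) (i : Int) (v : Int) :
    (PySem.List.insert s i v).length = s.length + 1 := by
  simp [PySem.List.insert]

-- _take: pop the smaller front of the two sorted runs base[i:], made[j:];
-- made[j] and base[i] on the guarded paths are in range, so they are read with
-- getD; the final base[i] may raise IndexError = the none case.
def take2 (base made : List Int) (i j : Nat) : Option (Int × Nat × Nat) :=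
  if j < made.length ∧ (base.length ≤ i ∨ made.getD j 0 ≤ base.getD i 0) then
    some (made.getD j 0, i, j + 1)
  else
    match PySem.List.pyGet? base (i : Int) with
    | none => none              -- both runs exhausted: IndexError
    | some x => some (x, i + 1, j)

-- each successful _take consumes one element of one of the runs
theorem take2_dec {base made : List Int} {i j : Nat} {m : Int} {i1 j1 : Nat}
    (h : take2 base made i j = some (m, i1, j1)) :
    base.length - i1 + (made.length - j1) < base.length - i + (made.length - j) := by
  unfold take2 at h
  split at h
  · rename_i hc
    obtain ⟨hj, -⟩ := hc
    simp only [Option.some.injEq, Prod.mk.injEq] at h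
    obtain ⟨-, rfl, rfl⟩ := h
    omega
  · split at h
    · exact absurd h (by simp)
    · rename_i x hx
      simp only [Option.some.injEq, Prod.mk.injEq] at h
      obtain ⟨-, rfl, rfl⟩ := h
      rw [PySem.List.pyGet?_natCast] at hx
      have : i < base.length := (List.getElem?_eq_some_iff.mp hx).1
      omega

def solutionAltGo (base made : List Int) (i j : Nat) (K : Int) (answer : Int) : Int :=
  match h1 : take2 base made i j with
  | none => answer              -- base[i] raises IndexError: excluded by Pre_solution
  | some (m1, i1, j1) =>
    if m1 ≥ K then answer
    else if i1 = base.length ∧ j1 = made.length then -1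
    else
      match h2 : take2 base made i1 j1 with
      | none => answer          -- unreachable: some element is left here
      | some (m2, i2, j2) =>
        let v := m1 + 2 * m2
        let lo := bisectGo made v j2 made.length
        solutionAltGo base (PySem.List.insert made (lo : Int) v) i2 j2 K (answer + 1)
termination_by base.length - i + (made.length - j)
decreasing_by
  have d1 := take2_dec h1
  have d2 := take2_dec h2
  simp only [length_pyInsert]
  omega

def solution_alt (scoville : List Int) (K : Int) : Int :=
  solutionAltGo (PySem.List.sorted scoville (fun x => x) false) [] 0 0 K 0

-- ===== PRECONDITION & SPEC =====
-- Pre_ excludes only the empty list, on which A's first heappop raises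
-- IndexError (B's first base[i] raises there as well).
def Pre_solution (scoville : List Int) (K : Int) : Prop := scoville ≠ []
instance (scoville : List Int) (K : Int) : Decidable (Pre_solution scoville K) := by
  unfold Pre_solution; infer_instance

def pvWitness_solution : List Int × Int := ([1, 2, 9], 7)

def Spec_solution (scoville : List Int) (K : Int) (out : Int) : Prop := out = solution_alt scoville K
instance (scoville : List Int) (K : Int) (out : Int) : Decidable (Spec_solution scoville K out) := by unfold Spec_solution; infer_instance

-- ===== CLAIM (what is proved, stated in full; the proofs are below) =====
def Claim_equal_solution : Prop := ∀ (scoville : List Int) (K : Int), Dom_solution scoville K → Pre_solution scoville K → Spec_solution scoville K (solution scoville K)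

-- ===== LEMMAS AND PROOFS =====

-- insertion of v into a sorted list just before its first element ≥ v
def insSorted (v : Int) : List Int → List Int
  | [] => [v]
  | x :: xs => if x < v then x :: insSorted v xs else v :: x :: xs

theorem length_insSorted (v : Int) (l : List Int) :
    (insSorted v l).length = l.length + 1 := by
  induction l with
  | nil => rfl
  | cons x xs ih => simp only [insSorted]; split <;> simp [ih]

-- reference form of B's loop: the merged live contents as one explicit sorted list
def mixGo (s : List Int) (K : Int) (answer : Int) : Int :=
  match s with
  | [] => answer
  | m1 :: t =>
    if m1 ≥ K then answer
    else
      match t with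
      | [] => -1
      | m2 :: t2 => mixGo (insSorted (m1 + 2 * m2) t2) K (answer + 1)
termination_by s.length
decreasing_by simp [length_insSorted]

theorem mixGo_nil (K a : Int) : mixGo [] K a = a := by
  rw [mixGo.eq_def]

theorem mixGo_one (m1 K a : Int) : mixGo [m1] K a = if m1 ≥ K then a else -1 := by
  rw [mixGo.eq_def]

theorem mixGo_cons₂ (m1 m2 : Int) (t2 : List Int) (K a : Int) :
    mixGo (m1 :: m2 :: t2) K a =
      if m1 ≥ K then a else mixGo (insSorted (m1 + 2 * m2) t2) K (a + 1) := by
  rw [mixGo.eq_def]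

theorem insSorted_perm (v : Int) (l : List Int) :
    (insSorted v l).Perm (v :: l) := by
  induction l with
  | nil => exact List.Perm.refl _
  | cons x xs ih =>
    simp only [insSorted]
    split
    · exact (ih.cons x).trans (List.Perm.swap v x xs)
    · exact List.Perm.refl _

theorem insSorted_pairwise (v : Int) (l : List Int)
    (h : l.Pairwise (· ≤ ·)) : (insSorted v l).Pairwise (· ≤ ·) := by
  induction l with
  | nil => simp [insSorted]
  | cons x xs ih =>
    rcases List.pairwise_cons.mp h with ⟨hx, hxs⟩
    simp only [insSorted]
    split
    · rename_i hlt
      refine List.pairwise_cons.mpr ⟨?_, ih hxs⟩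
      intro y hy
      have : y ∈ v :: xs := (insSorted_perm v xs).mem_iff.mp hy
      rcases List.mem_cons.mp this with h' | h'
      · exact h' ▸ le_of_lt hlt
      · exact hx y h'
    · rename_i hnlt
      refine List.pairwise_cons.mpr ⟨?_, h⟩
      intro y hy
      rcases List.mem_cons.mp hy with h' | h'
      · exact h' ▸ le_of_not_gt hnlt
      · exact le_trans (le_of_not_gt hnlt) (hx y h')

-- the head of a sorted list is the first-minimum value of any permutation of it
theorem min?_of_perm_sorted (h : List Int) (m : Int) (t : List Int)
    (hp : (m :: t).Perm h) (hs : (m :: t).Pairwise (· ≤ ·)) :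
    PySem.List.min? h (fun x => x) = some m := by
  have hne : h ≠ [] := by
    intro e; subst e; exact absurd hp.eq_nil (by simp)
  match e : PySem.List.min? h (fun x => x) with
  | none => exact absurd ((PySem.List.min?_eq_none_iff h (fun x => x)).mp e) hne
  | some w =>
    have hwh : w ∈ h := PySem.List.min?_mem e
    have hmin : ∀ y ∈ h, w ≤ y := fun y hy => PySem.List.min?_isMin e y hy
    have hw_le_m : w ≤ m := hmin m (hp.mem_iff.mp (List.mem_cons_self))
    have hm_le_w : m ≤ w := by
      have : w ∈ m :: t := hp.mem_iff.mpr hwh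
      rcases List.mem_cons.mp this with h' | h'
      · exact le_of_eq h'.symm
      · exact (List.pairwise_cons.mp hs).1 w h'
    exact congrArg some (le_antisymm hw_le_m hm_le_w)

-- A's loop = the reference loop, related through "sorted permutation" states
theorem go_eq : ∀ (n : Nat) (h s : List Int) (K a : Int),
    h.length ≤ n → s.Perm h → s.Pairwise (· ≤ ·) →
    solutionGo h K a = mixGo s K a := by
  intro n
  induction n with
  | zero =>
    intro h s K a hlen hp _
    have hh : h = [] := List.length_eq_zero_iff.mp (Nat.le_zero.mp hlen)
    subst hh
    have hs0 : s = [] := hp.eq_nil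
    subst hs0
    rw [solutionGo.eq_def, mixGo.eq_def]; rfl
  | succ n ih =>
    intro h s K a hlen hp hs
    match s with
    | [] =>
      have hh : h = [] := hp.symm.eq_nil
      subst hh
      rw [solutionGo.eq_def, mixGo.eq_def]; rfl
    | m1 :: t =>
      have hmin1 : PySem.List.min? h (fun x => x) = some m1 :=
        min?_of_perm_sorted h m1 t hp hs
      have hm1h : m1 ∈ h := PySem.List.min?_mem hmin1
      have erest : PySem.List.remove? h m1 = some (h.erase m1) :=
        PySem.List.remove?_eq_some_erase h m1 hm1h
      have hrestp : t.Perm (h.erase m1) :=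
        List.Perm.cons_inv (hp.trans (List.perm_cons_erase hm1h))
      rw [solutionGo.eq_def, mixGo.eq_def]
      split
      · rename_i hnone
        rw [hmin1] at hnone; exact absurd hnone (by simp)
      · rename_i min1 hsome
        rw [hmin1] at hsome
        injection hsome with e1
        subst e1
        simp only [erest, Option.getD_some]
        by_cases hK : m1 ≥ K
        · rw [if_pos hK, if_pos hK]
        · rw [if_neg hK, if_neg hK]
          have hlent : (h.erase m1).length = t.length := hrestp.length_eq.symm
          match t with
          | [] =>
            have h0 : (h.erase m1).length = 0 := by simpa using hlent
            rw [if_pos h0]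
          | m2 :: t2 =>
            have hne : ¬ (h.erase m1).length = 0 := by rw [hlent]; simp
            rw [if_neg hne]
            have hst : (m2 :: t2).Pairwise (· ≤ ·) := (List.pairwise_cons.mp hs).2
            have hmin2 : PySem.List.min? (h.erase m1) (fun x => x) = some m2 :=
              min?_of_perm_sorted (h.erase m1) m2 t2 hrestp hst
            have hm2 : m2 ∈ h.erase m1 := PySem.List.min?_mem hmin2
            have erest2 : PySem.List.remove? (h.erase m1) m2 =
                some ((h.erase m1).erase m2) :=
              PySem.List.remove?_eq_some_erase (h.erase m1) m2 hm2
            split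
            · rename_i hnone2
              simp only [erest, Option.getD_some] at hnone2
              rw [hmin2] at hnone2; exact absurd hnone2 (by simp)
            · rename_i min2 hsome2
              simp only [erest, Option.getD_some] at hsome2
              rw [hmin2] at hsome2
              injection hsome2 with e2
              subst e2
              simp only [erest2, Option.getD_some]
              have hrest2p : t2.Perm ((h.erase m1).erase m2) :=
                List.Perm.cons_inv (hrestp.trans (List.perm_cons_erase hm2))
              have hperm' : (insSorted (m1 + 2 * m2) t2).Perm
                  ((h.erase m1).erase m2 ++ [m1 + m2 * 2]) := by
                have e : m1 + 2 * m2 = m1 + m2 * 2 := by ring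
                rw [e]
                refine (insSorted_perm _ t2).trans ?_
                refine ((hrest2p.cons (m1 + m2 * 2)).trans ?_)
                simpa using
                  (List.perm_append_comm (l₁ := [m1 + m2 * 2])
                    (l₂ := (h.erase m1).erase m2))
              have hlen' : ((h.erase m1).erase m2 ++ [m1 + m2 * 2]).length ≤ n := by
                have l1 : (h.erase m1).length + 1 = h.length :=
                  List.length_erase_add_one hm1h
                have l2 : ((h.erase m1).erase m2).length + 1 = (h.erase m1).length :=
                  List.length_erase_add_one hm2
                simp only [List.length_append, List.length_cons, List.length_nil]
                omega
              have hsorted' : (insSorted (m1 + 2 * m2) t2).Pairwise (· ≤ ·) :=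
                insSorted_pairwise _ _ (List.pairwise_cons.mp hst).2
              exact ih ((h.erase m1).erase m2 ++ [m1 + m2 * 2])
                (insSorted (m1 + 2 * m2) t2) K (a + 1) hlen' hperm' hsorted'

-- PySem.List.insert at an in-range nonnegative index is take/cons/drop
theorem pyInsert_eq (s : List Int) (lo : Nat) (v : Int) (h : lo ≤ s.length) :
    PySem.List.insert s (lo : Int) v = s.take lo ++ v :: s.drop lo := by
  simp [PySem.List.insert, PySem.List.sliceIndices]
  have e : (if (lo : Int) < 0 then max ((lo : Int) + (s.length : Int)) 0
      else min (lo : Int) (s.length : Int)).toNat = lo := by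
    rw [if_neg (by omega)]
    omega
  rw [e]

-- the binary-search loop on a sorted region: everything left of the result is
-- < v, nothing from the result to hi is < v, and the result stays in [lo, hi]
theorem bisectGo_spec (s : List Int) (v : Int) :
    ∀ (n lo hi : Nat), hi - lo ≤ n → hi ≤ s.length →
    (∀ p q, lo ≤ p → p ≤ q → q < hi → s.getD p 0 ≤ s.getD q 0) →
    lo ≤ bisectGo s v lo hi ∧ bisectGo s v lo hi ≤ max lo hi ∧
    (∀ k, lo ≤ k → k < bisectGo s v lo hi → s.getD k 0 < v) ∧
    (∀ k, bisectGo s v lo hi ≤ k → k < hi → ¬ s.getD k 0 < v) := by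
  intro n
  induction n with
  | zero =>
    intro lo hi hn _ _
    rw [bisectGo.eq_def]
    have : ¬ lo < hi := by omega
    rw [if_neg this]
    refine ⟨le_rfl, le_max_left _ _, ?_, ?_⟩ <;> intro k h1 h2 <;> omega
  | succ n ih =>
    intro lo hi hn hhi hmono
    rw [bisectGo.eq_def]
    by_cases hlt : lo < hi
    · rw [if_pos hlt]
      simp only []
      by_cases hc : s.getD ((lo + hi) / 2) 0 < v
      · rw [if_pos hc]
        have hrec := ih ((lo + hi) / 2 + 1) hi (by omega) hhi
          (fun p q hp hpq hq => hmono p q (by omega) hpq hq)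
        rcases hrec with ⟨r1, r2, r3, r4⟩
        refine ⟨by omega, by omega, ?_, r4⟩
        intro k hk1 hk2
        by_cases hk3 : (lo + hi) / 2 + 1 ≤ k
        · exact r3 k hk3 hk2
        · calc s.getD k 0 ≤ s.getD ((lo + hi) / 2) 0 :=
                hmono k ((lo + hi) / 2) hk1 (by omega) (by omega)
            _ < v := hc
      · rw [if_neg hc]
        have hrec := ih lo ((lo + hi) / 2) (by omega) (by omega)
          (fun p q hp hpq hq => hmono p q hp hpq (by omega))
        rcases hrec with ⟨r1, r2, r3, r4⟩
        refine ⟨r1, by omega, r3, ?_⟩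
        intro k hk1 hk2 hk3
        by_cases hk4 : k < (lo + hi) / 2
        · exact r4 k hk1 hk4 hk3
        · exact hc (lt_of_le_of_lt (hmono ((lo + hi) / 2) k (by omega) (by omega) hk2) hk3)
    · rw [if_neg hlt]
      refine ⟨le_rfl, le_max_left _ _, ?_, ?_⟩ <;> intro k h1 h2 <;> omega

-- inserting at the first index whose element is not < v IS ordered insertion
theorem take_cons_drop_eq_insSorted (v : Int) :
    ∀ (l : List Int) (j : Nat), j ≤ l.length →
    l.Pairwise (· ≤ ·) →
    (∀ k, k < j → l.getD k 0 < v) →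
    (j = l.length ∨ ¬ l.getD j 0 < v) →
    l.take j ++ v :: l.drop j = insSorted v l := by
  intro l
  induction l with
  | nil =>
    intro j hj _ _ _
    have hj0 : j = 0 := by simpa using hj
    subst hj0; rfl
  | cons x xs ih =>
    intro j hj hs hlt hge
    match j with
    | 0 =>
      have hx : ¬ x < v := by
        rcases hge with h | h
        · simp at h
        · simpa using h
      simp [insSorted, hx]
    | j' + 1 =>
      have hx : x < v := by simpa using hlt 0 (by omega)
      simp only [List.take_succ_cons, List.drop_succ_cons, List.cons_append,
        insSorted, if_pos hx]
      congr 1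
      refine ih j' (by simpa using hj) (List.pairwise_cons.mp hs).2 ?_ ?_
      · intro k hk
        simpa using hlt (k + 1) (by omega)
      · rcases hge with h | h
        · left; simpa using h
        · right; simpa using h

-- the tail from j: l[j:] as head + rest, with the head read as getD
theorem drop_eq_getD_cons {l : List Int} {j : Nat} (h : j < l.length) :
    l.drop j = l.getD j 0 :: l.drop (j + 1) := by
  rw [List.drop_eq_getElem_cons h]
  congr 1
  rw [List.getD_eq_getElem?_getD, List.getElem?_eq_getElem h]
  rfl

-- inserting at the binary-search position = ordered insertion into the live tail
theorem insert_at_bisect (l : List Int) (v : Int) (j : Nat) (hj : j ≤ l.length)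
    (hs : (l.drop j).Pairwise (· ≤ ·)) :
    (PySem.List.insert l ((bisectGo l v j l.length : Nat) : Int) v).drop j
      = insSorted v (l.drop j) := by
  have hmono : ∀ p q, j ≤ p → p ≤ q → q < l.length →
      l.getD p 0 ≤ l.getD q 0 := by
    intro p q hp hpq hq
    have e1 : l.getD p 0 = (l.drop j).getD (p - j) 0 := by
      have hp' : j + (p - j) = p := by omega
      rw [List.getD_eq_getElem?_getD, List.getD_eq_getElem?_getD,
        List.getElem?_drop, hp']
    have e2 : l.getD q 0 = (l.drop j).getD (q - j) 0 := by
      have hq' : j + (q - j) = q := by omega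
      rw [List.getD_eq_getElem?_getD, List.getD_eq_getElem?_getD,
        List.getElem?_drop, hq']
    rw [e1, e2]
    have hple : p - j ≤ q - j := by omega
    have hqlt : q - j < (l.drop j).length := by
      simp [List.length_drop]; omega
    rcases Nat.eq_or_lt_of_le hple with heq | hlt
    · rw [heq]
    · have := List.pairwise_iff_getElem.mp hs (p - j) (q - j)
        (by omega) hqlt hlt
      rw [List.getD_eq_getElem?_getD, List.getD_eq_getElem?_getD,
        List.getElem?_eq_getElem (by omega : p - j < (l.drop j).length),
        List.getElem?_eq_getElem hqlt]
      simpa using this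
  have hspec := bisectGo_spec l v (l.length - j) j l.length
    (by omega) le_rfl hmono
  set lo := bisectGo l v j l.length with hlo
  rcases hspec with ⟨hlo1, hlo2, hlo3, hlo4⟩
  have hlo2' : lo ≤ l.length := by
    have h2 := hlo2
    rw [Nat.max_eq_right hj] at h2
    exact h2
  rw [pyInsert_eq l lo v hlo2']
  have hdt : (l.take lo ++ v :: l.drop lo).drop j =
      (l.drop j).take (lo - j) ++ v :: (l.drop j).drop (lo - j) := by
    rw [List.drop_append_of_le_length (by simp [List.length_take]; omega)]
    rw [List.drop_take, List.drop_drop,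
      (by omega : j + (lo - j) = lo)]
  rw [hdt]
  refine take_cons_drop_eq_insSorted v (l.drop j) (lo - j)
    (by simp [List.length_drop]; omega) hs ?_ ?_
  · intro k hk
    have h' : l.getD (j + k) 0 < v := hlo3 (j + k) (by omega) (by omega)
    rw [List.getD_eq_getElem?_getD, List.getElem?_drop]
    rw [List.getD_eq_getElem?_getD] at h'
    exact h'
  · by_cases hend2 : lo = l.length
    · left; simp [List.length_drop]; omega
    · right
      have h' : ¬ l.getD lo 0 < v := hlo4 lo le_rfl (by omega)
      rw [List.getD_eq_getElem?_getD, List.getElem?_drop,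
        (by omega : j + (lo - j) = lo)]
      rw [List.getD_eq_getElem?_getD] at h'
      exact h'

-- when both runs are exhausted, _take raises (= none) and the loop returns answer
theorem altGo_empty (base made : List Int) (i j : Nat) (K a : Int)
    (hi : base.length ≤ i) (hj : made.length ≤ j) :
    solutionAltGo base made i j K a = a := by
  have htk : take2 base made i j = none := by
    unfold take2
    rw [if_neg (by omega)]
    rw [PySem.List.pyGet?_natCast, List.getElem?_eq_none_iff.mpr hi]
  rw [solutionAltGo.eq_def]
  split
  · rfl
  · rename_i m1 i1 j1 hsome
    rw [htk] at hsome
    exact absurd hsome (by simp)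

-- _take returns exactly the head of the sorted merged contents
theorem take2_spec (base made : List Int) (i j : Nat) (m : Int) (s' : List Int)
    (hi : i ≤ base.length) (hj : j ≤ made.length)
    (hbs : (base.drop i).Pairwise (· ≤ ·)) (hms : (made.drop j).Pairwise (· ≤ ·))
    (hsort : (m :: s').Pairwise (· ≤ ·))
    (hperm : (m :: s').Perm (base.drop i ++ made.drop j)) :
    ∃ i1 j1, take2 base made i j = some (m, i1, j1) ∧
      i1 ≤ base.length ∧ j1 ≤ made.length ∧
      (base.drop i1).Pairwise (· ≤ ·) ∧ (made.drop j1).Pairwise (· ≤ ·) ∧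
      s'.Perm (base.drop i1 ++ made.drop j1) := by
  have hmin : ∀ y ∈ base.drop i ++ made.drop j, m ≤ y := by
    intro y hy
    have : y ∈ m :: s' := hperm.mem_iff.mpr hy
    rcases List.mem_cons.mp this with rfl | h'
    · exact le_rfl
    · exact (List.pairwise_cons.mp hsort).1 y h'
  have hmem : m ∈ base.drop i ++ made.drop j := hperm.mem_iff.mp List.mem_cons_self
  by_cases hc : j < made.length ∧ (base.length ≤ i ∨ made.getD j 0 ≤ base.getD i 0)
  · obtain ⟨hjlt, hcc⟩ := hc
    have hmd : made.drop j = made.getD j 0 :: made.drop (j + 1) := drop_eq_getD_cons hjlt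
    have h1 : m ≤ made.getD j 0 :=
      hmin _ (by rw [hmd]; exact List.mem_append_right _ List.mem_cons_self)
    have h2 : made.getD j 0 ≤ m := by
      rcases List.mem_append.mp hmem with hb | hm
      · have hbne : base.drop i ≠ [] := by intro e; rw [e] at hb; cases hb
        have hilt : i < base.length := by
          by_contra hh
          exact hbne (List.drop_eq_nil_of_le (by omega))
        have hbd : base.drop i = base.getD i 0 :: base.drop (i + 1) :=
          drop_eq_getD_cons hilt
        have hble : base.getD i 0 ≤ m := by
          rw [hbd] at hb
          rw [hbd] at hbs
          rcases List.mem_cons.mp hb with he | h'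
          · exact le_of_eq he.symm
          · exact (List.pairwise_cons.mp hbs).1 m h'
        rcases hcc with hge | hle
        · exact absurd hge (by omega)
        · exact le_trans hle hble
      · rw [hmd] at hm
        rw [hmd] at hms
        rcases List.mem_cons.mp hm with he | h'
        · exact le_of_eq he.symm
        · exact (List.pairwise_cons.mp hms).1 m h'
    have hmeq : made.getD j 0 = m := le_antisymm h2 h1
    refine ⟨i, j + 1, ?_, hi, by omega, hbs, ?_, ?_⟩
    · unfold take2
      rw [if_pos ⟨hjlt, hcc⟩, hmeq]
    · rw [hmd] at hms; exact (List.pairwise_cons.mp hms).2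
    · have hstep : (m :: s').Perm (m :: (base.drop i ++ made.drop (j + 1))) := by
        refine hperm.trans ?_
        rw [hmd, hmeq]
        exact List.perm_middle
      exact hstep.cons_inv
  · have hbne : base.drop i ≠ [] := by
      intro e
      have hmne : made.drop j ≠ [] := by
        intro e2
        have hl := hperm.length_eq
        rw [e, e2] at hl
        simp at hl
      have hjlt : j < made.length := by
        by_contra hh
        exact hmne (List.drop_eq_nil_of_le (by omega))
      have hge : base.length ≤ i := by
        by_contra hh
        have : base.drop i ≠ [] := by
          intro e3
          have := List.length_drop (i := i) (l := base) ▸ congrArg List.length e3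
          simp at this
          omega
        exact this e
      exact hc ⟨hjlt, Or.inl hge⟩
    have hilt : i < base.length := by
      by_contra hh
      exact hbne (List.drop_eq_nil_of_le (by omega))
    have hbd : base.drop i = base.getD i 0 :: base.drop (i + 1) := drop_eq_getD_cons hilt
    have hpg : PySem.List.pyGet? base (i : Int) = some (base.getD i 0) := by
      rw [PySem.List.pyGet?_natCast, List.getElem?_eq_getElem hilt,
        List.getD_eq_getElem?_getD, List.getElem?_eq_getElem hilt]
      rfl
    have h1 : m ≤ base.getD i 0 :=
      hmin _ (by rw [hbd]; exact List.mem_append_left _ List.mem_cons_self)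
    have h2 : base.getD i 0 ≤ m := by
      rcases List.mem_append.mp hmem with hb | hm
      · rw [hbd] at hb
        rw [hbd] at hbs
        rcases List.mem_cons.mp hb with he | h'
        · exact le_of_eq he.symm
        · exact (List.pairwise_cons.mp hbs).1 m h'
      · have hmne : made.drop j ≠ [] := by intro e; rw [e] at hm; cases hm
        have hjlt : j < made.length := by
          by_contra hh
          exact hmne (List.drop_eq_nil_of_le (by omega))
        have hmd : made.drop j = made.getD j 0 :: made.drop (j + 1) :=
          drop_eq_getD_cons hjlt
        have hmle : made.getD j 0 ≤ m := by
          rw [hmd] at hm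
          rw [hmd] at hms
          rcases List.mem_cons.mp hm with he | h'
          · exact le_of_eq he.symm
          · exact (List.pairwise_cons.mp hms).1 m h'
        have hno : ¬ (base.length ≤ i ∨ made.getD j 0 ≤ base.getD i 0) :=
          fun h => hc ⟨hjlt, h⟩
        rcases not_or.mp hno with ⟨-, hno2⟩
        exact le_of_lt (lt_of_lt_of_le (not_le.mp hno2) hmle)
    have hmeq : base.getD i 0 = m := le_antisymm h2 h1
    refine ⟨i + 1, j, ?_, by omega, hj, ?_, hms, ?_⟩
    · unfold take2
      rw [if_neg hc, hpg, hmeq]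
    · rw [hbd] at hbs; exact (List.pairwise_cons.mp hbs).2
    · have hstep : (m :: s').Perm (m :: (base.drop (i + 1) ++ made.drop j)) := by
        refine hperm.trans ?_
        rw [hbd, hmeq]
        exact List.Perm.refl _
      exact hstep.cons_inv

-- B's loop = the reference loop on the sorted merge of its two live runs
theorem altGo_eq_mixGo : ∀ (n : Nat) (base made : List Int) (i j : Nat) (K a : Int)
    (s : List Int),
    base.length - i + (made.length - j) ≤ n →
    i ≤ base.length → j ≤ made.length →
    (base.drop i).Pairwise (· ≤ ·) → (made.drop j).Pairwise (· ≤ ·) →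
    s.Pairwise (· ≤ ·) → s.Perm (base.drop i ++ made.drop j) →
    solutionAltGo base made i j K a = mixGo s K a := by
  intro n
  induction n with
  | zero =>
    intro base made i j K a s hn hi hj _ _ _ hperm
    have hi' : base.length ≤ i := by omega
    have hj' : made.length ≤ j := by omega
    have hs0 : s = [] := by
      have : base.drop i ++ made.drop j = [] := by
        rw [List.drop_eq_nil_of_le hi', List.drop_eq_nil_of_le hj']
        rfl
      rw [this] at hperm
      exact hperm.eq_nil
    rw [altGo_empty base made i j K a hi' hj', hs0, mixGo_nil]
  | succ n ih =>
    intro base made i j K a s hn hi hj hbs hms hsort hperm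
    match s with
    | [] =>
      have hcat : base.drop i ++ made.drop j = [] := hperm.symm.eq_nil
      rcases List.append_eq_nil_iff.mp hcat with ⟨hb0, hm0⟩
      have hi' : base.length ≤ i := by
        by_contra hh
        have := congrArg List.length hb0
        simp at this
        omega
      have hj' : made.length ≤ j := by
        by_contra hh
        have := congrArg List.length hm0
        simp at this
        omega
      rw [altGo_empty base made i j K a hi' hj', mixGo_nil]
    | m1 :: s' =>
      obtain ⟨i1, j1, htk1, hi1, hj1, hbs1, hms1, hperm1⟩ :=
        take2_spec base made i j m1 s' hi hj hbs hms hsort hperm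
      rw [solutionAltGo.eq_def]
      split
      · rename_i hnone
        rw [htk1] at hnone
        exact absurd hnone (by simp)
      · rename_i pm pi pj hsome
        rw [htk1] at hsome
        simp only [Option.some.injEq, Prod.mk.injEq] at hsome
        obtain ⟨rfl, rfl, rfl⟩ := hsome
        by_cases hK : m1 ≥ K
        · rw [if_pos hK]
          match s' with
          | [] => rw [mixGo_one, if_pos hK]
          | m2 :: s'' => rw [mixGo_cons₂, if_pos hK]
        · rw [if_neg hK]
          match s' with
          | [] =>
            have hcat : base.drop i1 ++ made.drop j1 = [] := hperm1.symm.eq_nil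
            rcases List.append_eq_nil_iff.mp hcat with ⟨hb0, hm0⟩
            have hie : i1 = base.length := by
              have := congrArg List.length hb0
              simp at this
              omega
            have hje : j1 = made.length := by
              have := congrArg List.length hm0
              simp at this
              omega
            rw [if_pos ⟨hie, hje⟩, mixGo_one, if_neg hK]
          | m2 :: s'' =>
            have hne : ¬ (i1 = base.length ∧ j1 = made.length) := by
              rintro ⟨hie, hje⟩
              have : base.drop i1 ++ made.drop j1 = [] := by
                rw [hie, hje, List.drop_length, List.drop_length]
                rfl
              rw [this] at hperm1
              exact absurd hperm1.eq_nil (by simp)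
            rw [if_neg hne]
            have hsort' : (m2 :: s'').Pairwise (· ≤ ·) :=
              (List.pairwise_cons.mp hsort).2
            obtain ⟨i2, j2, htk2, hi2, hj2, hbs2, hms2, hperm2⟩ :=
              take2_spec base made i1 j1 m2 s'' hi1 hj1 hbs1 hms1 hsort' hperm1
            split
            · rename_i hnone2
              rw [htk2] at hnone2
              exact absurd hnone2 (by simp)
            · rename_i qm qi qj hsome2
              rw [htk2] at hsome2
              simp only [Option.some.injEq, Prod.mk.injEq] at hsome2
              obtain ⟨rfl, rfl, rfl⟩ := hsome2
              rw [mixGo_cons₂, if_neg hK]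
              have htail := insert_at_bisect made (m1 + 2 * m2) j2 hj2 hms2
              have d1 := take2_dec htk1
              have d2 := take2_dec htk2
              refine ih base (PySem.List.insert made
                  ((bisectGo made (m1 + 2 * m2) j2 made.length : Nat) : Int)
                  (m1 + 2 * m2))
                i2 j2 K (a + 1) (insSorted (m1 + 2 * m2) s'')
                ?_ hi2 ?_ hbs2 ?_ ?_ ?_
              · rw [length_pyInsert]; omega
              · rw [length_pyInsert]; omega
              · rw [htail]
                exact insSorted_pairwise _ _ hms2
              · exact insSorted_pairwise _ _ (List.pairwise_cons.mp hsort').2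
              · rw [htail]
                refine (insSorted_perm _ s'').trans ?_
                refine ((hperm2.cons (m1 + 2 * m2)).trans ?_)
                refine (List.perm_middle.symm.trans ?_)
                exact List.Perm.append_left _ (insSorted_perm _ _).symm

-- ===== VERDICT (by name: the statement is the Claim_ definition above) =====
theorem solution_spec : Claim_equal_solution := by
  intro scoville K _ _
  unfold Spec_solution solution solution_alt
  rw [altGo_eq_mixGo ((PySem.List.sorted scoville (fun x => x) false).length)
    (PySem.List.sorted scoville (fun x => x) false) [] 0 0 K 0
    (PySem.List.sorted scoville (fun x => x) false)
    (by simp) (by omega) (by simp)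
    (by simpa using PySem.List.sorted_pairwise scoville (fun x => x))
    (by simp)
    (PySem.List.sorted_pairwise scoville (fun x => x))
    (by simp)]
  exact go_eq scoville.length scoville
    (PySem.List.sorted scoville (fun x => x) false) K 0 le_rfl
    (PySem.List.sorted_perm scoville (fun x => x) false)
    (PySem.List.sorted_pairwise scoville (fun x => x))
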